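-- pv_equiv track=rewrite | github.com/CoenHordijk/SAP-BO-WebI-file-analyzer | WID analyzer/WIDParseTools.py | getReportTDTag
-- ===== SOURCE A (Python) =====
-- def getReportTDTag(docprops):
-- # Zoekt in de rapport description of er geaccepteede technical debt in staat
--
--     tdtag = ''
--     if 'description' in docprops:
--         description = docprops['description']
--         if description.find('#TD')> -1:
--             for descline in description.splitlines():
--                 if descline.find('#TD')> -1:
--                     tdtag = descline
--
--     return tdtag
-- ===== SOURCE B (Python) =====
-- def getReportTDTag(docprops):
--     description = docprops.get('description', '')
--     for line in reversed(description.splitlines()):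
--         if '#TD' in line:
--             return line
--     return ''
-- ===== Notes on version B (the rewrite author's own statement) =====
-- stated objective: simpler
-- what changed: Replaces A's guard-plus-forward-scan with last-match accumulator by a single backward scan that returns the first matching line from the end (and drops the redundant whole-string '#TD' pre-check).
import Mathlib
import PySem

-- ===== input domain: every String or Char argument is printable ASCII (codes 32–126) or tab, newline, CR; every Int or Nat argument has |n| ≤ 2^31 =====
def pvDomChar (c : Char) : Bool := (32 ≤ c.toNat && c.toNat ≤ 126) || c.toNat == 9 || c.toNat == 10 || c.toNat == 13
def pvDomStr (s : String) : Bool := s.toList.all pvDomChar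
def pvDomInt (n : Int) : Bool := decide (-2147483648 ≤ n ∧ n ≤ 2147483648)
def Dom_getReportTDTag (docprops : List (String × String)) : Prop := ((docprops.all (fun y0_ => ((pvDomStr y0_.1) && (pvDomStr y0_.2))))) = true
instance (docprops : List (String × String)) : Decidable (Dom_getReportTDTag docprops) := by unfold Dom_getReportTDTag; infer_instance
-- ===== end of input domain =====

-- B scans the lines backwards and returns the first match; A scans forwards keeping the last match
-- behind a redundant whole-string pre-check. Same return value; no speed claim.

-- ===== PORT A =====
def getReportTDTag (docprops : List (String × String)) : String :=
  let tdtag := ""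
  match (PySem.Dict.mk docprops).get? "description" with
  | none => tdtag
  | some description =>
    if PySem.Str.find description "#TD" > -1 then
      (PySem.Str.splitlines description).foldl
        (fun tdtag descline => if PySem.Str.find descline "#TD" > -1 then descline else tdtag)
        tdtag
    else tdtag

-- ===== PORT B =====
def getReportTDTag_alt (docprops : List (String × String)) : String :=
  let description := (PySem.Dict.mk docprops).getD "description" ""
  match (PySem.Str.splitlines description).reverse.find? (fun line => PySem.Str.isIn "#TD" line) with
  | some line => line
  | none => ""

-- ===== PRECONDITION & SPEC =====
def Spec_getReportTDTag (docprops : List (String × String)) (out : String) : Prop := out = getReportTDTag_alt docprops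
instance (docprops : List (String × String)) (out : String) : Decidable (Spec_getReportTDTag docprops out) := by unfold Spec_getReportTDTag; infer_instance

-- ===== CLAIM (what is proved, stated in full; the proofs are below) =====
def Claim_equal_getReportTDTag : Prop := ∀ (docprops : List (String × String)), Dom_getReportTDTag docprops → Spec_getReportTDTag docprops (getReportTDTag docprops)

-- ===== LEMMAS AND PROOFS =====

-- the two programs test a line with the same predicate
theorem pred_eq (s : String) :
    (decide (PySem.Str.find s "#TD" > -1)) = PySem.Str.isIn "#TD" s := by
  by_cases h : ("#TD" : String).toList <:+: s.toList
  · have h1 : (0:Int) ≤ PySem.Str.find s "#TD" := (PySem.Str.find_nonneg_iff s "#TD").mpr h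
    have h2 : PySem.Str.isIn "#TD" s = true := (PySem.Str.isIn_iff_infix "#TD" s).mpr h
    simp only [h2, decide_eq_true_eq]
    omega
  · have h1 : ¬ (0:Int) ≤ PySem.Str.find s "#TD" := fun hc => h ((PySem.Str.find_nonneg_iff s "#TD").mp hc)
    have h2 : PySem.Str.isIn "#TD" s ≠ true := fun hc => h ((PySem.Str.isIn_iff_infix "#TD" s).mp hc)
    simp only [Bool.eq_false_iff.mpr h2, decide_eq_false_iff_not]
    omega

-- last match of a forward scan = first match of the backward scan
theorem foldl_last (p : String → Bool) (xs : List String) (acc : String) :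
    xs.foldl (fun a x => if p x then x else a) acc = (xs.reverse.find? p).getD acc := by
  induction xs generalizing acc with
  | nil => rfl
  | cons x xs ih =>
    simp only [List.foldl_cons, ih, List.reverse_cons, List.find?_append]
    cases h : xs.reverse.find? p with
    | some y => simp
    | none => by_cases hp : p x <;> simp [List.find?, hp]

-- every line produced by splitlines.go is a previously accumulated line or an infix of cur.reverse ++ s
theorem go_infix (isB : Char → Bool) (s cur : List Char) (acc : List (List Char)) :
    ∀ l ∈ PySem.Chars.splitlines.go isB s cur acc, l ∈ acc ∨ l <:+: cur.reverse ++ s := by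
  fun_induction PySem.Chars.splitlines.go isB s cur acc with
  | case1 cur acc h =>
    intro l hl
    exact Or.inl (List.mem_reverse.mp hl)
  | case2 cur acc hcur =>
    intro l hl
    rcases List.mem_cons.mp (List.mem_reverse.mp hl) with he | hm
    · exact Or.inr (by simp [he])
    · exact Or.inl hm
  | case3 rest cur acc ih =>
    intro l hl
    have hsuf : rest <:+: cur.reverse ++ '\x0d' :: '\n' :: rest :=
      (((List.suffix_cons '\n' rest).trans (List.suffix_cons '\x0d' _)).trans
        (List.suffix_append _ _)).isInfix
    rcases ih l hl with hm | hi
    · rcases List.mem_cons.mp hm with he | hm2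
      · exact Or.inr (by subst he; exact (List.prefix_append _ _).isInfix)
      · exact Or.inl hm2
    · exact Or.inr ((by simpa using hi : l <:+: rest).trans hsuf)
  | case4 c rest cur acc hne hB ih =>
    intro l hl
    have hsuf : rest <:+: cur.reverse ++ c :: rest :=
      ((List.suffix_cons c rest).trans (List.suffix_append _ _)).isInfix
    rcases ih l hl with hm | hi
    · rcases List.mem_cons.mp hm with he | hm2
      · exact Or.inr (by subst he; exact (List.prefix_append _ _).isInfix)
      · exact Or.inl hm2
    · exact Or.inr ((by simpa using hi : l <:+: rest).trans hsuf)
  | case5 c rest cur acc hne hB ih =>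
    intro l hl
    rcases ih l hl with hm | hi
    · exact Or.inl hm
    · exact Or.inr (by simpa [List.append_assoc] using hi)

theorem mem_splitlines_infix (s : List Char) (l : List Char)
    (hl : l ∈ PySem.Chars.splitlines s) : l <:+: s := by
  rcases go_infix _ s [] [] l hl with h | h
  · simp at h
  · simpa using h

-- ===== VERDICT (by name: the statement is the Claim_ definition above) =====
theorem getReportTDTag_spec : Claim_equal_getReportTDTag := by
  intro docprops _
  unfold Spec_getReportTDTag getReportTDTag getReportTDTag_alt
  cases hd : (PySem.Dict.mk docprops).get? "description" with
  | none =>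
    simp only [PySem.Dict.getD_eq_get?_getD, hd, Option.getD_none]
    rfl
  | some description =>
    simp only [PySem.Dict.getD_eq_get?_getD, hd, Option.getD_some]
    by_cases hg : PySem.Str.find description "#TD" > -1
    · simp only [if_pos hg]
      rw [show (fun (a x : String) => if PySem.Str.find x "#TD" > -1 then x else a)
            = (fun a x => if PySem.Str.isIn "#TD" x then x else a) from by
          funext a x; rw [← pred_eq x]; simp]
      rw [foldl_last]
      cases hf : (PySem.Str.splitlines description).reverse.find?
          (fun line => PySem.Str.isIn "#TD" line) <;> simp
    · simp only [if_neg hg]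
      have hnone : (PySem.Str.splitlines description).reverse.find?
          (fun line => PySem.Str.isIn "#TD" line) = none := by
        rw [List.find?_eq_none]
        intro l hl hc
        have hmem : l ∈ PySem.Str.splitlines description := List.mem_reverse.mp hl
        have hinf : l.toList <:+: description.toList := by
          apply mem_splitlines_infix
          rw [← PySem.Str.splitlines_map_toList]
          exact List.mem_map_of_mem hmem
        have h1 : ("#TD" : String).toList <:+: l.toList :=
          (PySem.Str.isIn_iff_infix "#TD" l).mp hc
        have h2 := (PySem.Str.find_nonneg_iff description "#TD").mpr (h1.trans hinf)
        omega
      rw [hnone]
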